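-- pv_equiv track=rewrite | github.com/wnsrb003/SW_JUNGLE | codingtest/programmers/3.py | solution
-- ===== SOURCE A (Python) =====
-- def solution(order):
--     from collections import deque
--     queue = deque([i for i in range(1, len(order)+1)])
--     stack = []
--     answer = []
--     for i in order:
--         if stack and stack[-1] == i:
--             answer.append(stack.pop())
--             continue
--         while queue:
--             q = queue.popleft()
--             if q == i:
--                 answer.append(q)
--                 break
--             stack.append(q)
--         else:
--             break
--     return len(answer)
-- ===== SOURCE B (Python) =====
-- def solution(order):
--     idx = 0
--     stack = []
--     for x in range(1, len(order) + 1):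
--         stack.append(x)
--         while stack and idx < len(order) and stack[-1] == order[idx]:
--             stack.pop()
--             idx += 1
--     return idx
-- ===== Notes on version B (the rewrite author's own statement) =====
-- stated objective: simpler
-- what changed: Replaces the deque-of-conveyor-numbers consumed by an inner scan per order element with the canonical single-stack greedy: loop over the conveyor numbers 1..n, push each, and pop while the stack top matches the next wanted order element tracked by an index pointer; the returned index equals A's answer count.
import Mathlib
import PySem

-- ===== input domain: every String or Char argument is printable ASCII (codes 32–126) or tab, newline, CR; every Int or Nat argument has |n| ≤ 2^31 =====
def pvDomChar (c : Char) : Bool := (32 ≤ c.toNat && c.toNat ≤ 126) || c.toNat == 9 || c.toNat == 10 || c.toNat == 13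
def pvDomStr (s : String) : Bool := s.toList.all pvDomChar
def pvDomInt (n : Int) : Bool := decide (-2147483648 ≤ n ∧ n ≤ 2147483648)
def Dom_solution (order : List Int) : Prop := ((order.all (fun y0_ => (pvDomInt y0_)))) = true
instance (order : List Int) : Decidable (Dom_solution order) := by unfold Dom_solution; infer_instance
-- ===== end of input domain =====

-- B replaces A's deque-plus-inner-scan with the canonical single-stack greedy over 1..n (simpler; same cost).
-- Stacks are represented head-as-top in both ports.

-- ===== PORT A =====
-- inner 'while queue' loop: pop from the queue front, pushing non-matching numbers onto the
-- stack; 'some (queue', stack')' = break with a match, 'none' = queue exhausted (for-else break)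
def aScan (i : Int) : List Int → List Int → Option (List Int × List Int)
  | [], _ => none
  | q :: qs, stack => if q = i then some (qs, stack) else aScan i qs (q :: stack)

-- outer 'for i in order' loop; the Int result counts answer.append (len(answer) is returned)
def aRun : List Int → List Int → List Int → Int
  | [], _, _ => 0
  | i :: os, queue, stack =>
    match stack with
    | t :: s' =>
      if t = i then 1 + aRun os queue s'
      else
        match aScan i queue (t :: s') with
        | none => 0
        | some (q', st') => 1 + aRun os q' st'
    | [] =>
      match aScan i queue [] with
      | none => 0
      | some (q', st') => 1 + aRun os q' st'

def solution (order : List Int) : Int :=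
  aRun order (PySem.List.pyRange 1 ((order.length : Int) + 1) 1) []

-- ===== PORT B =====
-- 'while stack and idx < len(order) and stack[-1] == order[idx]: stack.pop(); idx += 1'
def bPop (order : List Int) : List Int → Int → List Int × Int
  | [], idx => ([], idx)
  | t :: s', idx =>
    if idx < (order.length : Int) ∧ PySem.List.pyGet? order idx = some t then
      bPop order s' (idx + 1)
    else (t :: s', idx)

-- 'for x in range(1, len(order)+1): stack.append(x); <while loop>'
def bRun (order : List Int) : List Int → List Int → Int → Int
  | [], _, idx => idx
  | x :: xs, stack, idx =>
    let p := bPop order (x :: stack) idx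
    bRun order xs p.1 p.2

def solution_alt (order : List Int) : Int :=
  bRun order (PySem.List.pyRange 1 ((order.length : Int) + 1) 1) [] 0

-- ===== PRECONDITION & SPEC =====
def Spec_solution (order : List Int) (out : Int) : Prop := out = solution_alt order
instance (order : List Int) (out : Int) : Decidable (Spec_solution order out) := by unfold Spec_solution; infer_instance

-- ===== CLAIM (what is proved, stated in full; the proofs are below) =====
def Claim_equal_solution : Prop := ∀ (order : List Int), Dom_solution order → Spec_solution order (solution order)

-- ===== LEMMAS AND PROOFS =====

-- mathematical model of the pop-while chain: pop while the stack top equals the order head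
def popAll : List Int → List Int → List Int × List Int × Nat
  | t :: s', i :: os' =>
    if t = i then
      let p := popAll s' os'
      (p.1, p.2.1, p.2.2 + 1)
    else (t :: s', i :: os', 0)
  | s, os => (s, os, 0)

lemma popAll_nil_os (s : List Int) : popAll s [] = (s, [], 0) := by
  cases s <;> rfl

lemma popAll_drop (s os : List Int) :
    (popAll s os).2.1 = os.drop (popAll s os).2.2 := by
  induction s generalizing os with
  | nil => cases os <;> rfl
  | cons t s' ih =>
    cases os with
    | nil => rfl
    | cons i os' =>
      by_cases h : t = i
      · simp [popAll, h, ih os']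
      · simp [popAll, h]

def Stable (s os : List Int) : Prop := popAll s os = (s, os, 0)

lemma stable_of_ne {t i : Int} (s os : List Int) (h : t ≠ i) :
    Stable (t :: s) (i :: os) := by
  simp [Stable, popAll, h]

lemma stable_nil_stack (os : List Int) : Stable [] os := by
  cases os <;> rfl

lemma stable_nil_os (s : List Int) : Stable s [] := popAll_nil_os s

lemma popAll_stable (s os : List Int) :
    Stable (popAll s os).1 (popAll s os).2.1 := by
  induction s generalizing os with
  | nil => cases os <;> simp [popAll, Stable]
  | cons t s' ih =>
    cases os with
    | nil => simp [popAll, Stable]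
    | cons i os' =>
      by_cases h : t = i
      · simpa [popAll, h] using ih os'
      · simp [popAll, h, Stable]

-- A's first-branch chain over successive order elements computes exactly popAll
lemma aRun_popAll (os s queue : List Int) :
    aRun os queue s =
      ((popAll s os).2.2 : Int) + aRun (popAll s os).2.1 queue (popAll s os).1 := by
  induction os generalizing s with
  | nil => simp [popAll_nil_os]
  | cons i os' ih =>
    cases s with
    | nil => simp [popAll]
    | cons t s' =>
      by_cases h : t = i
      · have := ih s'
        simp [popAll, h, aRun, this]
        ring
      · simp [popAll, h]

-- B's while loop computes popAll against the suffix of order at the index pointer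
lemma bPop_popAll (order : List Int) (s : List Int) (k : Nat) :
    bPop order s (k : Int) =
      ((popAll s (order.drop k)).1, (k : Int) + ((popAll s (order.drop k)).2.2 : Int)) := by
  induction s generalizing k with
  | nil => simp [bPop, popAll]
  | cons t s' ih =>
    rcases h : order.drop k with _ | ⟨i, os'⟩
    · have hk : order.length ≤ k := by
        by_contra hlt
        push_neg at hlt
        have := List.drop_eq_getElem_cons hlt
        rw [h] at this
        exact List.cons_ne_nil _ _ this.symm
      have hcond : ¬((k : Int) < (order.length : Int) ∧
          PySem.List.pyGet? order (k : Int) = some t) := by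
        rintro ⟨h1, -⟩
        omega
      rw [bPop, if_neg hcond, popAll_nil_os]
      simp
    · have hklt : k < order.length := by
        by_contra hge
        push_neg at hge
        rw [List.drop_eq_nil_of_le hge] at h
        exact List.cons_ne_nil _ _ h.symm
      have hcons : order[k] :: order.drop (k + 1) = i :: os' := by
        rw [← List.drop_eq_getElem_cons hklt, h]
      have hidx : order[k] = i := (List.cons_eq_cons.mp hcons).1
      have hdrop1 : order.drop (k + 1) = os' := (List.cons_eq_cons.mp hcons).2
      have hget : PySem.List.pyGet? order (k : Int) = some i := by
        simp [hklt, hidx]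
      by_cases ht : t = i
      · have hcond : ((k : Int) < (order.length : Int) ∧
            PySem.List.pyGet? order (k : Int) = some t) := by
          refine ⟨by exact_mod_cast hklt, by rw [hget, ht]⟩
        have ih1 := ih (k + 1)
        rw [hdrop1] at ih1
        push_cast at ih1
        rw [bPop, if_pos hcond, ih1]
        simp [popAll, ht]
        ring
      · have hcond : ¬((k : Int) < (order.length : Int) ∧
            PySem.List.pyGet? order (k : Int) = some t) := by
          rintro ⟨-, h2⟩
          rw [hget] at h2
          exact ht (Option.some.inj h2).symm
        rw [bPop, if_neg hcond]
        simp [popAll, ht]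

-- on an exhausted conveyor, a stable state yields no further matches in A
lemma aRun_nil_queue (os s : List Int) (hs : Stable s os) : aRun os [] s = 0 := by
  cases os with
  | nil => rfl
  | cons i os' =>
    cases s with
    | nil => simp [aRun, aScan]
    | cons t s' =>
      have ht : t ≠ i := by
        intro h
        simp [Stable, popAll, h] at hs
      simp [aRun, ht, aScan]

-- pushing a non-matching conveyor number commutes between A's inner scan and its stack
lemma aRun_push (i x : Int) (os2 s nums : List Int) (hx : x ≠ i) (hs : Stable s (i :: os2)) :
    aRun (i :: os2) (x :: nums) s = aRun (i :: os2) nums (x :: s) := by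
  cases s with
  | nil => simp [aRun, aScan, hx]
  | cons t s' =>
    have ht : t ≠ i := by
      intro h
      simp [Stable, popAll, h] at hs
    simp [aRun, ht, aScan, hx]

-- a matching conveyor number is consumed by A's inner scan from a stable state
lemma aRun_match (i : Int) (os2 s nums : List Int) (hs : Stable s (i :: os2)) :
    aRun (i :: os2) (i :: nums) s = 1 + aRun os2 nums s := by
  cases s with
  | nil => simp [aRun, aScan]
  | cons t s' =>
    have ht : t ≠ i := by
      intro h
      simp [Stable, popAll, h] at hs
    simp [aRun, ht, aScan]

-- main bisimulation: from any stable synchronized state the two loops agree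
lemma main_lemma (nums : List Int) :
    ∀ (s : List Int) (k : Nat) (order : List Int),
      Stable s (order.drop k) →
      bRun order nums s (k : Int) = (k : Int) + aRun (order.drop k) nums s := by
  induction nums with
  | nil =>
    intro s k order hs
    simp [bRun, aRun_nil_queue _ _ hs]
  | cons x nums' ih =>
    intro s k order hs
    have hbp := bPop_popAll order (x :: s) k
    rcases hos : order.drop k with _ | ⟨i, os2⟩
    · rw [hos, popAll_nil_os] at hbp
      simp only [bRun, hbp, Nat.cast_zero, add_zero]
      rw [ih (x :: s) k order (by rw [hos]; exact stable_nil_os _), hos]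
      simp [aRun]
    · rw [hos] at hbp
      by_cases hx : x = i
      · -- the pushed number matches: B pops a whole chain, A matches then chains lazily
        have hpop : popAll (x :: s) (i :: os2) =
            ((popAll s os2).1, (popAll s os2).2.1, (popAll s os2).2.2 + 1) := by
          simp [popAll, hx]
        rw [hpop] at hbp
        have hdrop1 : order.drop (k + 1) = os2 := by
          have := congrArg List.tail hos
          simpa [← List.tail_drop] using this
        have hdrop2 : order.drop (k + 1 + (popAll s os2).2.2) = (popAll s os2).2.1 := by
          rw [popAll_drop s os2, ← hdrop1, List.drop_drop]
        have hst : Stable (popAll s os2).1 (order.drop (k + 1 + (popAll s os2).2.2)) := by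
          rw [hdrop2, popAll_drop s os2, ← popAll_drop s os2]
          exact popAll_stable s os2
        have ih1 := ih (popAll s os2).1 (k + 1 + (popAll s os2).2.2) order hst
        rw [hdrop2] at ih1
        simp only [bRun, hbp]
        have hcast : (k : Int) + ((popAll s os2).2.2 + 1 : Nat) =
            ((k + 1 + (popAll s os2).2.2 : Nat) : Int) := by push_cast; ring
        rw [hcast, ih1, hx, aRun_match i os2 s nums' (by rw [hos] at hs; exact hs),
          aRun_popAll os2 s nums']
        push_cast
        ring
      · -- non-matching push: both sides just transfer x onto the stack
        have hpop : popAll (x :: s) (i :: os2) = (x :: s, i :: os2, 0) := by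
          simp [popAll, hx]
        rw [hpop] at hbp
        simp only [bRun, hbp, Nat.cast_zero, add_zero]
        rw [ih (x :: s) k order (by rw [hos]; exact stable_of_ne _ _ hx), hos,
          aRun_push i x os2 s nums' hx (hos ▸ hs)]

-- ===== VERDICT (by name: the statement is the Claim_ definition above) =====
theorem solution_spec : Claim_equal_solution := by
  intro order _
  unfold Spec_solution solution solution_alt
  have := main_lemma (PySem.List.pyRange 1 ((order.length : Int) + 1) 1) [] 0 order
    (by simpa using stable_nil_stack (order.drop 0))
  simpa using this.symm
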